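-- pv_equiv track=rewrite | github.com/JcAntoine/ProjetInfo2017 | inventaire.py | trouveIdObjet
-- ===== SOURCE A (Python) =====
-- def trouveIdObjet(inventaire,idCase) :
--     idC = -1
--     for idObjet,nbObjet in enumerate (inventaire) :
--         if nbObjet != 0 :
--             idC += 1
--             if idCase == idC : #c'est l'objet qu'on cherche
--                 return idObjet
--     return -1 #normalement n'arrive jamais
-- ===== SOURCE B (Python) =====
-- def trouveIdObjet(inventaire, idCase):
--     if idCase < 0:
--         return -1
--     def go(lo, hi, k):
--         # position of the k-th nonzero in inventaire[lo:hi], or -1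
--         if hi - lo <= 1:
--             if lo < hi and inventaire[lo] != 0 and k == 0:
--                 return lo
--             return -1
--         mid = (lo + hi) // 2
--         c = sum(1 for x in inventaire[lo:mid] if x != 0)
--         if k < c:
--             return go(lo, mid, k)
--         else:
--             return go(mid, hi, k - c)
--     return go(0, len(inventaire), idCase)
-- ===== Notes on version B (the rewrite author's own statement) =====
-- stated objective: alternative
-- what changed: Replaces the early-returning linear counting scan by a divide-and-conquer binary split: count the nonzeros in the left half and recurse into the half that contains the idCase-th nonzero.
import Mathlib
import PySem

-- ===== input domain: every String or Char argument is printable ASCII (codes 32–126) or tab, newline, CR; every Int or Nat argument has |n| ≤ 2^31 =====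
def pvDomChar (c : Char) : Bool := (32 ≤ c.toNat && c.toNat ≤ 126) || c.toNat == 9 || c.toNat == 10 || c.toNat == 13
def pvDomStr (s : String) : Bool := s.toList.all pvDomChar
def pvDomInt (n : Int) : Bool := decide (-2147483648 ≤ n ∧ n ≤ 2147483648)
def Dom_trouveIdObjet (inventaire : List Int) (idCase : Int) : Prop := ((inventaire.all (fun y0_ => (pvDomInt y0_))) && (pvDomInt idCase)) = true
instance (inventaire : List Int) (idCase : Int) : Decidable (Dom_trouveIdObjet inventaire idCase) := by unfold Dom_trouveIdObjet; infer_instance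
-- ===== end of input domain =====

-- B finds the idCase-th nonzero by divide-and-conquer on index halves instead of A's early-returning counting scan; same return value everywhere.
-- ===== PORT A =====
def trouveIdObjetGo (l : List Int) (idObjet : Int) (idC : Int) (idCase : Int) : Int :=
  match l with
  | [] => -1
  | nbObjet :: rest =>
    if nbObjet ≠ 0 then
      if idCase == idC + 1 then idObjet
      else trouveIdObjetGo rest (idObjet + 1) (idC + 1) idCase
    else trouveIdObjetGo rest (idObjet + 1) idC idCase

def trouveIdObjet (inventaire : List Int) (idCase : Int) : Int :=
  trouveIdObjetGo inventaire 0 (-1) idCase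

-- ===== PORT B =====
-- sum(1 for x in inventaire[lo:mid] if x != 0)
def countNZ (l : List Int) : Int := l.foldl (fun acc x => if x ≠ 0 then acc + 1 else acc) 0

-- inner recursive go(lo, hi, k); lo/hi are nonnegative slice bounds so Nat is exact here,
-- and inventaire[lo] with 0 ≤ lo < len(inventaire) is exactly List.getD lo 0 (lo is in range on every call).
def trouveIdObjetAltGo (inventaire : List Int) (lo hi : Nat) (k : Int) : Int :=
  if hi - lo ≤ 1 then
    if lo < hi ∧ inventaire.getD lo 0 ≠ 0 ∧ k = 0 then (lo : Int) else -1
  else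
    let mid := (lo + hi) / 2
    let c := countNZ ((inventaire.drop lo).take (mid - lo))
    if k < c then trouveIdObjetAltGo inventaire lo mid k
    else trouveIdObjetAltGo inventaire mid hi (k - c)
termination_by hi - lo
decreasing_by all_goals omega

def trouveIdObjet_alt (inventaire : List Int) (idCase : Int) : Int :=
  if idCase < 0 then -1 else trouveIdObjetAltGo inventaire 0 inventaire.length idCase

-- ===== PRECONDITION & SPEC =====
def Spec_trouveIdObjet (inventaire : List Int) (idCase : Int) (out : Int) : Prop := out = trouveIdObjet_alt inventaire idCase
instance (inventaire : List Int) (idCase : Int) (out : Int) : Decidable (Spec_trouveIdObjet inventaire idCase out) := by unfold Spec_trouveIdObjet; infer_instance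

-- ===== CLAIM (what is proved, stated in full; the proofs are below) =====
def Claim_equal_trouveIdObjet : Prop := ∀ (inventaire : List Int) (idCase : Int), Dom_trouveIdObjet inventaire idCase → Spec_trouveIdObjet inventaire idCase (trouveIdObjet inventaire idCase)

-- ===== LEMMAS AND PROOFS =====
-- reference: list of positions of nonzero entries, starting at index i
def posList : List Int → Int → List Int
  | [], _ => []
  | n :: rest, i => if n ≠ 0 then i :: posList rest (i + 1) else posList rest (i + 1)

theorem posList_append (a b : List Int) (i : Int) :
    posList (a ++ b) i = posList a i ++ posList b (i + a.length) := by
  induction a generalizing i with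
  | nil => simp [posList]
  | cons x rest ih =>
    have h : (i + 1) + (rest.length : Int) = i + ((x :: rest).length : Int) := by
      simp only [List.length_cons]; push_cast; ring
    by_cases hx : x ≠ 0
    · simp only [List.cons_append, posList, if_pos hx, ih, ← h]
    · simp only [List.cons_append, posList, if_neg hx, ih, ← h]

theorem countNZ_go (l : List Int) (a : Int) :
    l.foldl (fun acc x => if x ≠ 0 then acc + 1 else acc) a = a + countNZ l := by
  induction l generalizing a with
  | nil => simp [countNZ]
  | cons x rest ih =>
    simp only [countNZ, List.foldl]
    rw [ih, ih]
    split_ifs <;> omega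

theorem countNZ_eq_len (l : List Int) (i : Int) :
    ((posList l i).length : Int) = countNZ l := by
  induction l generalizing i with
  | nil => simp [posList, countNZ]
  | cons x rest ih =>
    simp only [posList, countNZ, List.foldl]
    rw [countNZ_go]
    have := ih (i + 1)
    by_cases hx : x ≠ 0
    · simp only [if_pos hx, List.length_cons]
      push_cast
      omega
    · simp only [if_neg hx]
      omega

-- the A-side characterisation (proved for the previous submission, reused)
theorem go_eq (l : List Int) (i c idCase : Int) :
    trouveIdObjetGo l i c idCase =
      (if c + 1 ≤ idCase ∧ idCase - (c + 1) < (posList l i).length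
       then (posList l i).getD (idCase - (c + 1)).toNat (-1) else -1) := by
  induction l generalizing i c with
  | nil => simp [trouveIdObjetGo, posList]
  | cons n rest ih =>
    by_cases hn : n ≠ 0
    · simp only [trouveIdObjetGo, posList, if_pos hn]
      by_cases he : idCase = c + 1
      · subst he
        simp only [beq_self_eq_true, if_true]
        rw [if_pos ⟨le_refl _, by simp only [List.length_cons]; push_cast; omega⟩]
        simp [List.getD]
      · rw [if_neg (by simpa using he)]
        rw [ih]
        simp only [List.length_cons]
        by_cases h1 : c + 1 + 1 ≤ idCase ∧ idCase - (c + 1 + 1) < (posList rest (i+1)).length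
        · rw [if_pos h1, if_pos (by push_cast; omega)]
          have ht : (idCase - (c + 1)).toNat = (idCase - (c + 1 + 1)).toNat + 1 := by omega
          simp [ht, List.getD]
        · rw [if_neg h1, if_neg (by push_cast; omega)]
    · simp only [trouveIdObjetGo, posList, if_neg hn]
      exact ih (i+1) c

-- the B-side characterisation: go on a segment looks up the k-th nonzero position of that segment
theorem altGo_eq (inv : List Int) (lo hi : Nat) (k : Int)
    (hlo : lo ≤ hi) (hhi : hi ≤ inv.length) (hk : 0 ≤ k) :
    trouveIdObjetAltGo inv lo hi k =
      (if k < (posList ((inv.drop lo).take (hi - lo)) (lo : Int)).length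
       then (posList ((inv.drop lo).take (hi - lo)) (lo : Int)).getD k.toNat (-1) else -1) := by
  generalize hm : hi - lo = m
  induction m using Nat.strong_induction_on generalizing lo hi k with
  | _ m ih =>
  subst hm
  unfold trouveIdObjetAltGo
  by_cases hsmall : hi - lo ≤ 1
  · rw [if_pos hsmall]
    rcases Nat.lt_or_ge lo hi with hlt | hge
    · -- hi = lo + 1
      have h1 : hi - lo = 1 := by omega
      have hlen : lo < inv.length := by omega
      have hdrop : inv.drop lo = inv[lo] :: inv.drop (lo + 1) := List.drop_eq_getElem_cons hlen
      have hseg : (inv.drop lo).take (hi - lo) = [inv[lo]] := by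
        rw [h1, hdrop]
        rfl
      rw [hseg]
      have hgetD : inv.getD lo 0 = inv[lo] := by
        simp [List.getD, List.getElem?_eq_getElem hlen]
      by_cases hz : inv[lo] ≠ 0
      · by_cases hk0 : k = 0
        · subst hk0
          rw [if_pos ⟨hlt, by rw [hgetD]; exact hz, rfl⟩]
          simp [posList, if_pos hz, List.getD]
        · rw [if_neg (by tauto)]
          simp only [posList, if_pos hz, posList, List.length_cons, List.length_nil]
          rw [if_neg (by omega)]
      · rw [if_neg (by rw [hgetD]; tauto)]
        simp [posList, not_ne_iff.mp hz]
    · -- lo = hi: empty segment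
      have h0 : hi - lo = 0 := by omega
      rw [if_neg (by omega)]
      rw [h0]
      simp [posList]
  · rw [if_neg hsmall]
    simp only []
    set mid := (lo + hi) / 2 with hmid
    have hmlo : lo < mid := by omega
    have hmhi : mid < hi := by omega
    clear_value mid
    -- split the segment at mid
    have hsplit : (inv.drop lo).take (hi - lo) =
        (inv.drop lo).take (mid - lo) ++ (inv.drop mid).take (hi - mid) := by
      have : hi - lo = (mid - lo) + (hi - mid) := by omega
      rw [this, List.take_add]
      congr 1
      rw [List.drop_drop, Nat.add_sub_cancel' hmlo.le]
    have hlenL : ((inv.drop lo).take (mid - lo)).length = mid - lo := by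
      rw [List.length_take, List.length_drop]; omega
    set c := countNZ ((inv.drop lo).take (mid - lo)) with hc
    have hcP : ((posList ((inv.drop lo).take (mid - lo)) (lo : Int)).length : Int) = c :=
      countNZ_eq_len _ _
    have hc0 : 0 ≤ c := by rw [← hcP]; positivity
    have hP : posList ((inv.drop lo).take (hi - lo)) (lo : Int) =
        posList ((inv.drop lo).take (mid - lo)) (lo : Int) ++
        posList ((inv.drop mid).take (hi - mid)) (mid : Int) := by
      rw [hsplit, posList_append, hlenL]
      congr 2
      omega
    rw [hP]
    set Pl := posList ((inv.drop lo).take (mid - lo)) (lo : Int) with hPl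
    set Pr := posList ((inv.drop mid).take (hi - mid)) (mid : Int) with hPr
    by_cases hlt : k < c
    · rw [if_pos hlt]
      rw [ih (mid - lo) (by omega) lo mid k (by omega) (by omega) hk rfl]
      rw [← hPl]
      have hkl : k < (Pl.length : Int) := by omega
      rw [if_pos hkl, if_pos (by simp only [List.length_append]; push_cast; omega)]
      have hn : k.toNat < Pl.length := by omega
      simp [List.getD, List.getElem?_append_left hn]
    · rw [if_neg hlt]
      rw [ih (hi - mid) (by omega) mid hi (k - c) (by omega) hhi (by omega) rfl]
      rw [← hPr]
      have hkl : ¬ k < (Pl.length : Int) := by omega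
      by_cases h2 : k - c < (Pr.length : Int)
      · rw [if_pos h2, if_pos (by simp only [List.length_append]; push_cast; omega)]
        have hge : Pl.length ≤ k.toNat := by omega
        have ht : (k - c).toNat = k.toNat - Pl.length := by omega
        simp [List.getD, List.getElem?_append_right hge, ht]
      · rw [if_neg h2, if_neg (by simp only [List.length_append]; push_cast; omega)]

-- ===== VERDICT (by name: the statement is the Claim_ definition above) =====
theorem trouveIdObjet_spec : Claim_equal_trouveIdObjet := by
  intro inv idCase _
  unfold Spec_trouveIdObjet trouveIdObjet trouveIdObjet_alt
  rw [go_eq]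
  by_cases hneg : idCase < 0
  · rw [if_pos hneg, if_neg (by omega)]
  · rw [if_neg hneg]
    rw [altGo_eq inv 0 inv.length idCase (by omega) (le_refl _) (by omega)]
    simp only [List.drop_zero, Nat.sub_zero, List.take_length, Nat.cast_zero]
    have h1 : (-1 : Int) + 1 = 0 := by omega
    rw [h1]
    by_cases h : idCase < ((posList inv 0).length : Int)
    · rw [if_pos ⟨by omega, by omega⟩, if_pos h]
      congr 1; omega
    · rw [if_neg (by omega), if_neg h]
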